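-- pv_equiv track=rewrite | github.com/rockramsri/Anime-Recommendation | ML-Files/score_generation.py | fillerPatternScore
-- ===== SOURCE A (Python) =====
-- def fillerPatternScore(fillerStr: str):
--     # Count the total number of 1s
--     total_ones = fillerStr.count('1')
--     # Find clusters of 1s
--     clusters = []
--     current_cluster = 0
--     for char in fillerStr:
--         if char == '1':
--             current_cluster += 1
--         else:
--             if current_cluster > 0:
--                 clusters.append(current_cluster)
--                 current_cluster = 0
--     if current_cluster > 0:
--         clusters.append(current_cluster)
--
--     # Calculate the number of clusters
--     number_of_clusters = len(clusters)
--
--     # Evaluate the length of each cluster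
--     cluster_lengths = clusters
--
--     # Frequency of clusters between zeros
--     frequency_between_zeros = max(0, number_of_clusters - 1)
--
--     w1 = 2  # weight for presence of 1s
--     w2 = 3  # weight for clustering of 1s (penalize more for larger clusters)
--     w3 = 1  # weight for frequency of clusters between zeros
--
--     penalty = (w1 * total_ones +
--            w2 * sum(cluster ** 2 for cluster in clusters) +  # quadratic penalty for larger clusters
--            w3 * frequency_between_zeros)
--
--     return penalty
-- ===== SOURCE B (Python) =====
-- def fillerPatternScore(fillerStr: str):
--     # Single pass that accumulates the score arithmetically: no cluster list is
--     # ever built.  Each '1' extending a run of previous length r adds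
--     # 2 (presence) + 3*(2*r+1) (the increment (r+1)^2 - r^2 of the squared
--     # cluster penalty) = 5 + 6*r, and each cluster start after the first adds 1.
--     score = 0
--     run = 0
--     seen = False
--     for ch in fillerStr:
--         if ch == '1':
--             score += 5 + 6 * run
--             if run == 0:
--                 if seen:
--                     score += 1
--                 seen = True
--             run += 1
--         else:
--             run = 0
--     return score
-- ===== Notes on version B (the rewrite author's own statement) =====
-- stated objective: alternative
-- what changed: Replaces A's two-stage approach (build a list of cluster lengths with a state machine plus a separate count, then apply the weighted formula over that list) by a single pass that accumulates the final score arithmetically via the telescoping increment (r+1)^2 - r^2 = 2r+1, so each '1' adds 5+6*run and each cluster start after the first adds 1; no cluster list or second pass exists.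
import Mathlib
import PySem

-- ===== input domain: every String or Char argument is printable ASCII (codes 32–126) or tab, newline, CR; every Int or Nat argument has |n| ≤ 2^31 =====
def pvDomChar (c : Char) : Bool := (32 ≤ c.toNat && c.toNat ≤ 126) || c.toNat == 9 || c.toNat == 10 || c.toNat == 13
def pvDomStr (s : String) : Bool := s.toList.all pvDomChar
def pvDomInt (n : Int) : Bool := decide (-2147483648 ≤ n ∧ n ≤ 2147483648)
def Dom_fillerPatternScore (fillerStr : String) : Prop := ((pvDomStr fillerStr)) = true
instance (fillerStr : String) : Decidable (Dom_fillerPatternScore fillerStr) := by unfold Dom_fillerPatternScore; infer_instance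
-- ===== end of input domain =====

-- B replaces A's cluster-list construction plus weighted formula by a single arithmetic
-- accumulation of the score (alternative decomposition; same O(n) cost).

-- ===== PORT A =====
-- A's per-character cluster state machine: (clusters so far, current run length).
def aStep (st : List Int × Int) (c : Char) : List Int × Int :=
  if c = '1' then (st.1, st.2 + 1)
  else if 0 < st.2 then (st.1 ++ [st.2], 0) else st

-- A's trailing flush of the still-open run.
def aFlush (st : List Int × Int) : List Int :=
  if 0 < st.2 then st.1 ++ [st.2] else st.1

def fillerPatternScore (fillerStr : String) : Int :=
  let totalOnes : Int := (PySem.Str.count fillerStr "1" : Int)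
  let clusters : List Int := aFlush (fillerStr.toList.foldl aStep ([], 0))
  let numberOfClusters : Int := (clusters.length : Int)
  let frequencyBetweenZeros : Int := max 0 (numberOfClusters - 1)
  2 * totalOnes + 3 * (clusters.map (fun c => c ^ 2)).sum + frequencyBetweenZeros

-- ===== PORT B =====
-- B's single arithmetic pass: state (score, run, seen).
def bStep (st : Int × Int × Bool) (c : Char) : Int × Int × Bool :=
  if c = '1' then
    let score := st.1 + 5 + 6 * st.2.1
    if st.2.1 = 0 then
      ((if st.2.2 then score + 1 else score), st.2.1 + 1, true)
    else (score, st.2.1 + 1, st.2.2)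
  else (st.1, 0, st.2.2)

def fillerPatternScore_alt (fillerStr : String) : Int :=
  (fillerStr.toList.foldl bStep (0, 0, false)).1

-- ===== PRECONDITION & SPEC =====
def Spec_fillerPatternScore (fillerStr : String) (out : Int) : Prop := out = fillerPatternScore_alt fillerStr
instance (fillerStr : String) (out : Int) : Decidable (Spec_fillerPatternScore fillerStr out) := by unfold Spec_fillerPatternScore; infer_instance

-- ===== CLAIM (what is proved, stated in full; the proofs are below) =====
def Claim_equal_fillerPatternScore : Prop := ∀ (fillerStr : String), Dom_fillerPatternScore fillerStr → Spec_fillerPatternScore fillerStr (fillerPatternScore fillerStr)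

-- ===== LEMMAS AND PROOFS =====

theorem aFlush_append (l m : List Int) (n : Int) :
    aFlush (l ++ m, n) = l ++ aFlush (m, n) := by
  unfold aFlush; split_ifs <;> simp


theorem aStep_one (l : List Int) (cur : Int) : aStep (l, cur) '1' = (l, cur + 1) := by
  simp [aStep]

theorem aStep_close (l : List Int) (cur : Int) (c : Char) (hc : c ≠ '1') (h : 0 < cur) :
    aStep (l, cur) c = (l ++ [cur], 0) := by
  simp [aStep, hc, h]

theorem aStep_skip (l : List Int) (cur : Int) (c : Char) (hc : c ≠ '1') (h : ¬ 0 < cur) :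
    aStep (l, cur) c = (l, cur) := by
  simp [aStep, hc, h]

theorem bStep_one0 (score : Int) (seen : Bool) :
    bStep (score, 0, seen) '1'
      = ((if seen then score + 5 + 6 * 0 + 1 else score + 5 + 6 * 0), 0 + 1, true) := by
  simp [bStep]

theorem bStep_one (score cur : Int) (seen : Bool) (h : cur ≠ 0) :
    bStep (score, cur, seen) '1' = (score + 5 + 6 * cur, cur + 1, seen) := by
  simp [bStep, h]

theorem bStep_zero (score cur : Int) (seen : Bool) (c : Char) (hc : c ≠ '1') :
    bStep (score, cur, seen) c = (score, 0, seen) := by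
  simp [bStep, hc]

-- A's fold from (l, cur) is l prepended to the fold from ([], cur).
theorem aFold_append : ∀ (cs : List Char) (l : List Int) (cur : Int),
    List.foldl aStep (l, cur) cs
      = (l ++ (List.foldl aStep ([], cur) cs).1, (List.foldl aStep ([], cur) cs).2) := by
  intro cs
  induction cs with
  | nil => intro l cur; simp
  | cons c rest ih =>
    intro l cur
    by_cases hc : c = '1'
    · subst hc
      rw [List.foldl_cons, List.foldl_cons, aStep_one, aStep_one]
      exact ih l (cur + 1)
    · by_cases h : 0 < cur
      · rw [List.foldl_cons, List.foldl_cons, aStep_close l cur c hc h,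
            aStep_close [] cur c hc h, List.nil_append, ih (l ++ [cur]) 0, ih [cur] 0]
        simp
      · rw [List.foldl_cons, List.foldl_cons, aStep_skip l cur c hc h,
            aStep_skip [] cur c hc h]
        exact ih l cur

theorem aFlush_len_pos : ∀ (cs : List Char) (cur : Int), 0 < cur →
    1 ≤ (aFlush (List.foldl aStep ([], cur) cs)).length := by
  intro cs
  induction cs with
  | nil =>
    intro cur h
    simp [aFlush, h]
  | cons c rest ih =>
    intro cur h
    by_cases hc : c = '1'
    · subst hc
      rw [List.foldl_cons, aStep_one]
      exact ih (cur + 1) (by omega)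
    · rw [List.foldl_cons, aStep_close [] cur c hc h, List.nil_append,
          aFold_append rest [cur] 0]
      rw [show ((([cur] : List Int) ++ (List.foldl aStep ([], 0) rest).1,
            (List.foldl aStep ([], 0) rest).2))
          = (([cur] : List Int) ++ (List.foldl aStep ([], 0) rest).1,
            (List.foldl aStep ([], 0) rest).2) from rfl, aFlush_append]
      simp

-- The central invariant: B's running score from (score, cur, seen) equals score plus
-- what A's formula contributes for the remaining characters, given an open run of length cur.
theorem bFold_eq : ∀ (cs : List Char) (score cur : Int) (seen : Bool), 0 ≤ cur →
    (List.foldl bStep (score, cur, seen) cs).1 =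
      score + 2 * (cs.count '1' : Int)
        + 3 * (((aFlush (List.foldl aStep ([], cur) cs)).map (fun c => c ^ 2)).sum - cur ^ 2)
        + (let starts : Int :=
             ((aFlush (List.foldl aStep ([], cur) cs)).length : Int) - (if 0 < cur then 1 else 0)
           if seen then starts else max 0 (starts - 1)) := by
  intro cs
  induction cs with
  | nil =>
    intro score cur seen h
    by_cases hcur : 0 < cur
    · simp [aFlush, hcur]
    · have : cur = 0 := by omega
      subst this
      simp [aFlush]
  | cons c rest ih =>
    intro score cur seen h
    by_cases hc : c = '1'
    · subst hc
      by_cases h0 : cur = 0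
      · subst h0
        rw [List.foldl_cons, List.foldl_cons, aStep_one, bStep_one0]
        have hK' := aFlush_len_pos rest 1 (by omega)
        cases seen <;>
          · rw [ih _ (0 + 1) true (by omega)]
            simp only [List.count_cons, if_pos rfl, max_def, zero_add]
            push_cast
            norm_num
            first | omega | (split_ifs <;> omega)
      · rw [List.foldl_cons, List.foldl_cons, aStep_one, bStep_one score cur seen h0]
        rw [ih _ (cur + 1) seen (by omega)]
        have hcur : 0 < cur := by omega
        rw [show ((cur + 1 : Int)) ^ 2 = cur ^ 2 + 2 * cur + 1 from by ring]
        generalize (cur : Int) ^ 2 = q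
        cases seen <;>
          · simp only [List.count_cons, if_pos rfl]
            push_cast
            norm_num [max_def]
            try simp only [if_pos h, if_pos hcur]
            first | omega | (split_ifs <;> omega)
    · by_cases hcur : 0 < cur
      · rw [List.foldl_cons, List.foldl_cons, aStep_close [] cur c hc hcur,
            List.nil_append, bStep_zero score cur seen c hc,
            ih score 0 seen le_rfl, aFold_append rest [cur] 0]
        rw [show ((([cur] : List Int) ++ (List.foldl aStep ([], 0) rest).1,
              (List.foldl aStep ([], 0) rest).2))
            = (([cur] : List Int) ++ (List.foldl aStep ([], 0) rest).1,
              (List.foldl aStep ([], 0) rest).2) from rfl, aFlush_append]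
        simp only [List.count_cons, if_neg hc, List.map_cons, List.sum_cons,
          List.singleton_append, List.length_cons, if_pos hcur, lt_irrefl,
          if_neg]
        generalize (cur : Int) ^ 2 = q
        push_cast
        norm_num [max_def]
        try simp only [if_pos h, if_pos hcur]
        first | omega | (split_ifs <;> omega)
      · have : cur = 0 := by omega
        subst this
        rw [List.foldl_cons, List.foldl_cons, aStep_skip [] 0 c hc hcur,
            bStep_zero score 0 seen c hc, ih score 0 seen le_rfl]
        simp [List.count_cons, hc]

-- PySem.Str.count with a single-character needle is List.count.
theorem countgo_single (c : Char) :
    ∀ (l : List Char) (fuel acc : Nat), l.length ≤ fuel →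
      PySem.Chars.count.go [c] fuel l acc = acc + l.count c := by
  intro l
  induction l with
  | nil =>
    intro fuel acc _
    cases fuel <;> simp [PySem.Chars.count.go]
  | cons x xs ih =>
    intro fuel acc hf
    cases fuel with
    | zero => simp at hf
    | succ f =>
      by_cases hx : c = x
      · subst hx
        have hpre : [c].isPrefixOf (c :: xs) = true := by simp [List.isPrefixOf]
        simp only [PySem.Chars.count.go, hpre, if_true]
        rw [show List.drop [c].length (c :: xs) = xs from rfl]
        rw [ih f (acc + 1) (by simpa using Nat.le_of_succ_le_succ hf)]
        simp
        omega
      · have hpre : [c].isPrefixOf (x :: xs) = false := by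
          simp [List.isPrefixOf, hx]
        simp only [PySem.Chars.count.go, hpre, Bool.false_eq_true, if_false]
        rw [ih f acc (by simpa using Nat.le_of_succ_le_succ hf)]
        simp [Ne.symm hx]

theorem count_single (c : Char) (s : List Char) :
    PySem.Chars.count s [c] = s.count c := by
  simp only [PySem.Chars.count, List.isEmpty_cons, Bool.false_eq_true, if_false]
  simpa using countgo_single c s s.length 0 le_rfl

-- ===== VERDICT (by name: the statement is the Claim_ definition above) =====
theorem fillerPatternScore_spec : Claim_equal_fillerPatternScore := by
  intro s _
  unfold Spec_fillerPatternScore fillerPatternScore fillerPatternScore_alt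
  rw [bFold_eq s.toList 0 0 false le_rfl]
  have hcount : (PySem.Str.count s "1" : Int) = ((s.toList.count '1' : Nat) : Int) := by
    rw [show PySem.Str.count s "1" = PySem.Chars.count s.toList ['1'] from rfl, count_single]
  rw [hcount]
  push_cast
  norm_num [max_def]
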